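-- pv_equiv track=rewrite | github.com/edera-dev/linux-kernel-oci | hack/build/util.py | smart_script_split
-- ===== SOURCE A (Python) =====
-- from typing import Optional
--
-- def smart_script_split(
--     command: list[str], description: Optional[str] = None
-- ) -> list[str]:
--     sections = []
--     current = []
--     is_potentially_value = False
--     for item in command:
--         arm_potentially_value = False
--         if item.startswith("-"):
--             if len(current) > 0:
--                 sections.append(current)
--                 current = []
--                 is_potentially_value = False
--             arm_potentially_value = True
--         current.append(item)
--         if is_potentially_value:
--             is_potentially_value = False
--             sections.append(current)
--             current = []
--         if arm_potentially_value:
--             is_potentially_value = True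
--     if len(current) > 0:
--         sections.append(current)
--     lines = []
--     if description is not None:
--         lines.append("# %s" % description)
--     for i, section in enumerate(sections):
--         line = " ".join(section)
--         if i != 0:
--             line = "  " + line
--         if i != len(sections) - 1:
--             line += " \\"
--         lines.append(line)
--     return lines
-- ===== SOURCE B (Python) =====
-- from typing import Optional
--
-- def smart_script_split(
--     command: list[str], description: Optional[str] = None
-- ) -> list[str]:
--     # Group with an index-based lookahead: a flag token grabs the next token
--     # iff it exists and is not itself a flag; non-flag runs merge into one section.
--     sections = []
--     current = []
--     i = 0
--     n = len(command)
--     while i < n: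
--         tok = command[i]
--         if tok.startswith("-"):
--             if current:
--                 sections.append(current)
--                 current = []
--             if i + 1 < n and not command[i + 1].startswith("-"):
--                 sections.append([tok, command[i + 1]])
--                 i += 2
--             else:
--                 sections.append([tok])
--                 i += 1
--         else:
--             current.append(tok)
--             i += 1
--     if current:
--         sections.append(current)
--     last = len(sections) - 1
--     header = [] if description is None else ["# %s" % description]
--     return header + [
--         ("  " if i else "") + " ".join(sec) + (" \\" if i != last else "")
--         for i, sec in enumerate(sections)
--     ]
-- ===== Notes on version B (the rewrite author's own statement) =====
-- stated objective: simpler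
-- what changed: Grouping is rewritten from A's deferred-flush boolean state machine (arm/is_potentially_value flags resolved one iteration later) to a direct lookahead loop where a flag token immediately grabs the following token iff it exists and is not itself a flag, and the line-formatting pass becomes a single map over the enumerated sections instead of an accumulating loop.
import Mathlib
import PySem

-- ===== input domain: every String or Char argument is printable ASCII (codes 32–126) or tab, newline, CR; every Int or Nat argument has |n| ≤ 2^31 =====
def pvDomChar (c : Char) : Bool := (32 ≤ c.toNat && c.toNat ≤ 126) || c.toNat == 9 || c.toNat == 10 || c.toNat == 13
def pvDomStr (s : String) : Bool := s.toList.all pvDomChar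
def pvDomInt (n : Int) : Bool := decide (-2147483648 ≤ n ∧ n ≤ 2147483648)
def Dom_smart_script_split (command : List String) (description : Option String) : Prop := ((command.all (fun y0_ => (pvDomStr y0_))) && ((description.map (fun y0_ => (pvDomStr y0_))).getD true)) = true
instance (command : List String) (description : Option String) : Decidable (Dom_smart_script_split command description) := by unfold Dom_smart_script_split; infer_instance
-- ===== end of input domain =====

-- B replaces A's deferred-flush boolean state machine by an index-free lookahead
-- grouping (a flag grabs the next token iff it exists and is not a flag) and a
-- map over the grouped sections instead of a line-accumulating loop (objective: simpler).

-- ===== PORT A =====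
-- one iteration of A's for-loop; state = (sections, current, is_potentially_value)
def pvStepA (st : List (List String) × List String × Bool) (item : String) :
    List (List String) × List String × Bool :=
  let sections := st.1
  let current := st.2.1
  let ipv := st.2.2
  let arm := false
  let (sections, current, ipv, arm) :=
    if PySem.Str.startswith item "-" then
      if current.length > 0 then (sections ++ [current], ([] : List String), false, true)
      else (sections, current, ipv, true)
    else (sections, current, ipv, arm)
  let current := current ++ [item]
  let (sections, current, ipv) :=
    if ipv then (sections ++ [current], ([] : List String), false)
    else (sections, current, ipv)
  let ipv := if arm then true else ipv
  (sections, current, ipv)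

def smart_script_split (command : List String) (description : Option String) : List String :=
  let st := command.foldl pvStepA ([], [], false)
  let sections := if st.2.1.length > 0 then st.1 ++ [st.2.1] else st.1
  let lines : List String := match description with
    | some d => ["# " ++ d]
    | none => []
  (PySem.List.enumerate sections).foldl
    (fun lines p =>
      let line := PySem.Str.join " " p.2
      let line := if p.1 ≠ 0 then "  " ++ line else line
      let line := if p.1 ≠ (sections.length : Int) - 1 then line ++ " \\" else line
      lines ++ [line])
    lines

-- ===== PORT B =====
-- Source B's while-loop with lookahead, as recursion on the token list
def pvGroupB (current : List String) : List String → List (List String)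
  | [] => if current.isEmpty then [] else [current]
  | tok :: rest =>
    if PySem.Str.startswith tok "-" then
      (if current.isEmpty then [] else [current]) ++
      (match rest with
       | next :: rest' =>
         if PySem.Str.startswith next "-" then [tok] :: pvGroupB [] (next :: rest')
         else [tok, next] :: pvGroupB [] rest'
       | [] => [[tok]])
    else pvGroupB (current ++ [tok]) rest
termination_by l => l.length
decreasing_by all_goals simp_all

def smart_script_split_alt (command : List String) (description : Option String) : List String :=
  let sections := pvGroupB [] command
  let last : Int := (sections.length : Int) - 1
  let header : List String := match description with
    | none => []
    | some d => ["# " ++ d]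
  header ++ (PySem.List.enumerate sections).map
    (fun p => ((if p.1 ≠ 0 then "  " else "") ++ PySem.Str.join " " p.2) ++
              (if p.1 ≠ last then " \\" else ""))

-- ===== PRECONDITION & SPEC =====
def Spec_smart_script_split (command : List String) (description : Option String) (out : List String) : Prop := out = smart_script_split_alt command description
instance (command : List String) (description : Option String) (out : List String) : Decidable (Spec_smart_script_split command description out) := by unfold Spec_smart_script_split; infer_instance

-- ===== CLAIM (what is proved, stated in full; the proofs are below) =====
def Claim_equal_smart_script_split : Prop := ∀ (command : List String) (description : Option String), Dom_smart_script_split command description → Spec_smart_script_split command description (smart_script_split command description)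

-- ===== LEMMAS AND PROOFS =====

-- A's final flush of the loop state
def pvFin (st : List (List String) × List String × Bool) : List (List String) :=
  if st.2.1.length > 0 then st.1 ++ [st.2.1] else st.1

-- what B produces for a flag x followed by the rest of the tokens
def pvArmed (x : String) (l : List String) : List (List String) :=
  match l with
  | [] => [[x]]
  | next :: rest' =>
    if PySem.Str.startswith next "-" then [x] :: pvGroupB [] (next :: rest')
    else [x, next] :: pvGroupB [] rest'

lemma pvGroupB_nil (cur : List String) :
    pvGroupB cur [] = if cur.isEmpty then [] else [cur] := by
  simp [pvGroupB]

lemma pvGroupB_cons (cur : List String) (tok : String) (rest : List String) :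
    pvGroupB cur (tok :: rest) =
      if PySem.Str.startswith tok "-" then
        (if cur.isEmpty then [] else [cur]) ++ pvArmed tok rest
      else pvGroupB (cur ++ [tok]) rest := by
  cases rest <;> simp [pvGroupB, pvArmed]

lemma pvStepA_flag_cons (secs : List (List String)) (c : String) (cs : List String) (b : Bool)
    (item : String) (h : PySem.Chars.startswith item.toList ['-'] = true) :
    pvStepA (secs, c :: cs, b) item = (secs ++ [c :: cs], [item], true) := by
  simp [pvStepA, h]

lemma pvStepA_flag_nil (secs : List (List String)) (item : String)
    (h : PySem.Chars.startswith item.toList ['-'] = true) :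
    pvStepA (secs, [], false) item = (secs, [item], true) := by
  simp [pvStepA, h]

lemma pvStepA_nonflag_false (secs : List (List String)) (cur : List String) (item : String)
    (h : PySem.Chars.startswith item.toList ['-'] = false) :
    pvStepA (secs, cur, false) item = (secs, cur ++ [item], false) := by
  simp [pvStepA, h]

lemma pvStepA_nonflag_true (secs : List (List String)) (x item : String)
    (h : PySem.Chars.startswith item.toList ['-'] = false) :
    pvStepA (secs, [x], true) item = (secs ++ [[x, item]], [], false) := by
  simp [pvStepA, h]

lemma pvGroup_eq (l : List String) :
    (∀ secs cur, pvFin (l.foldl pvStepA (secs, cur, false)) = secs ++ pvGroupB cur l) ∧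
    (∀ secs x, pvFin (l.foldl pvStepA (secs, [x], true)) = secs ++ pvArmed x l) := by
  induction l with
  | nil =>
    refine ⟨fun secs cur => ?_, fun secs x => ?_⟩
    · cases cur <;> simp [pvFin, pvGroupB_nil]
    · simp [pvFin, pvArmed]
  | cons tok rest ih =>
    refine ⟨fun secs cur => ?_, fun secs x => ?_⟩
    · rw [List.foldl_cons, pvGroupB_cons]
      cases hf : PySem.Chars.startswith tok.toList ['-'] with
      | true =>
        cases cur with
        | nil =>
          rw [pvStepA_flag_nil secs tok hf, ih.2]
          simp [hf]
        | cons c cs =>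
          rw [pvStepA_flag_cons secs c cs false tok hf, ih.2]
          simp [hf, List.append_assoc]
      | false =>
        rw [pvStepA_nonflag_false secs cur tok hf, ih.1]
        simp [hf]
    · rw [List.foldl_cons]
      cases hf : PySem.Chars.startswith tok.toList ['-'] with
      | true =>
        rw [pvStepA_flag_cons secs x [] true tok hf, ih.2]
        have hA : pvArmed x (tok :: rest) = [x] :: pvGroupB [] (tok :: rest) := by
          simp [pvArmed, hf]
        have hB : pvGroupB [] (tok :: rest) = pvArmed tok rest := by
          rw [pvGroupB_cons]; simp [hf]
        rw [hA, hB]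
        simp [List.append_assoc]
      | false =>
        rw [pvStepA_nonflag_true secs x tok hf, ih.1]
        have hA : pvArmed x (tok :: rest) = [x, tok] :: pvGroupB [] rest := by
          simp [pvArmed, hf]
        rw [hA]
        simp [List.append_assoc]

-- the two per-line formatters produce the same string
lemma pvLine_eq (n : Int) (p : Int × List String) :
    (if p.1 ≠ n
       then (if p.1 ≠ 0 then "  " ++ PySem.Str.join " " p.2 else PySem.Str.join " " p.2) ++ " \\"
       else (if p.1 ≠ 0 then "  " ++ PySem.Str.join " " p.2 else PySem.Str.join " " p.2)) =
    ((if p.1 ≠ 0 then "  " else "") ++ PySem.Str.join " " p.2) ++ (if p.1 ≠ n then " \\" else "") := by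
  split_ifs <;> simp [String.empty_append, String.append_empty]

-- ===== VERDICT (by name: the statement is the Claim_ definition above) =====
theorem smart_script_split_spec : Claim_equal_smart_script_split := by
  intro command description _
  show smart_script_split command description = smart_script_split_alt command description
  simp only [smart_script_split, smart_script_split_alt]
  have hsec := (pvGroup_eq command).1 [] []
  simp only [pvFin, List.nil_append] at hsec
  rw [hsec, PySem.List.foldl_append_singleton_eq_map]
  cases description <;>
    exact congrArg _ (List.map_congr_left fun p _ =>
      pvLine_eq ((pvGroupB [] command).length - 1) p)
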